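-- pv_equiv track=rewrite | github.com/TunaBakar-png/Struktur-Data | Tugas Praktikum (Minggu 3)/1.Manual Delete.py | manual_delete
-- ===== SOURCE A (Python) =====
-- def manual_delete(arr, index,):
--     n = len(arr)
--
--     if index < 0 or index >= n:
--         return "Error: Indeks di luar batas!"
--
--     hasil = arr[:]
--
--     for i in range(index, n - 1):
--         hasil[i] = hasil[i + 1]
--
--     hasil = hasil[:-1]
--
--     return hasil
-- ===== SOURCE B (Python) =====
-- def manual_delete(arr, index,):
--     n = len(arr)
--
--     if index < 0 or index >= n:
--         return "Error: Indeks di luar batas!"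
--
--     return arr[:index] + arr[index+1:]
-- ===== Notes on version B (the rewrite author's own statement) =====
-- stated objective: idiomatic
-- what changed: Replaces the copy-then-shift-left loop followed by truncation with a direct slice concatenation arr[:index] + arr[index+1:].
-- outside the precondition, e.g. on manual_delete([1, 2], 5): A returns 'Error: Indeks di luar batas!', B returns 'Error: Indeks di luar batas!'
import Mathlib
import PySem

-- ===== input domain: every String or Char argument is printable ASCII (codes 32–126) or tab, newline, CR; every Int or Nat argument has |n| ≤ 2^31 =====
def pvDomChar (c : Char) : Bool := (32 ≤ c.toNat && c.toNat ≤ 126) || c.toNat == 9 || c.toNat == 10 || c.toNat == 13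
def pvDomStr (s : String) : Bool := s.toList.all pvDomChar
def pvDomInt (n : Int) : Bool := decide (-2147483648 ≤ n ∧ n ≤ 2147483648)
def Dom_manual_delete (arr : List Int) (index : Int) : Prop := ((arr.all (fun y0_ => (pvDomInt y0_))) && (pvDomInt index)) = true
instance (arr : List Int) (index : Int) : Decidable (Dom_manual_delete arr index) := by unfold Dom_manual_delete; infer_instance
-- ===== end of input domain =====

-- B replaces A's copy-then-shift loop by direct slice concatenation arr[:index] ++ arr[index+1:] (idiomatic, same cost).

-- ===== PORT A =====
-- On an out-of-range index Python A returns the STRING "Error: Indeks di luar batas!" (not a list of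
-- ints); that branch is outside Pre_manual_delete, the port returns [] there.
def manual_delete (arr : List Int) (index : Int) : List Int :=
  let n : Int := arr.length
  if index < 0 ∨ index ≥ n then []
  else
    -- hasil = arr[:]; for i in range(index, n-1): hasil[i] = hasil[i+1]
    -- pySetD/pyGetD are exact here: every index touched is in range (index ≤ i < n-1).
    let hasil := (PySem.List.pyRange index (n - 1) 1).foldl
      (fun h i => PySem.List.pySetD h i (PySem.List.pyGetD h (i + 1) 0)) arr
    PySem.List.slice hasil none (some (-1))   -- hasil[:-1]

-- ===== PORT B =====
-- Same out-of-range branch note as above: Python B returns the error string there, outside Pre_.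
def manual_delete_alt (arr : List Int) (index : Int) : List Int :=
  let n : Int := arr.length
  if index < 0 ∨ index ≥ n then []
  else PySem.List.slice arr none (some index) ++ PySem.List.slice arr (some (index + 1)) none

-- ===== PRECONDITION & SPEC =====
-- Pre_ excludes exactly the out-of-range indices, where Python A returns an error STRING, not a list of ints.
def Pre_manual_delete (arr : List Int) (index : Int) : Prop :=
  0 ≤ index ∧ index < (arr.length : Int)
instance (arr : List Int) (index : Int) : Decidable (Pre_manual_delete arr index) := by
  unfold Pre_manual_delete; infer_instance

def pvWitness_manual_delete : List Int × Int := ([3, 1, 4, 1, 5], 2)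

def Spec_manual_delete (arr : List Int) (index : Int) (out : List Int) : Prop := out = manual_delete_alt arr index
instance (arr : List Int) (index : Int) (out : List Int) : Decidable (Spec_manual_delete arr index out) := by unfold Spec_manual_delete; infer_instance

-- ===== CLAIM (what is proved, stated in full; the proofs are below) =====
def Claim_equal_manual_delete : Prop := ∀ (arr : List Int) (index : Int), Dom_manual_delete arr index → Pre_manual_delete arr index → Spec_manual_delete arr index (manual_delete arr index)

-- ===== LEMMAS AND PROOFS =====

-- The shift loop, started at position k of a list of length k+1+d, produces
-- (take k) ++ (drop (k+1)) ++ [one leftover element] — exactly what hasil[:-1] then strips.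
theorem shift_foldl (d : Nat) : ∀ (k : Nat) (l : List Int), l.length = k + 1 + d →
    ∃ x, (PySem.List.pyRange (k : Int) ((l.length : Int) - 1) 1).foldl
        (fun h i => PySem.List.pySetD h i (PySem.List.pyGetD h (i + 1) 0)) l
      = l.take k ++ l.drop (k + 1) ++ [x] := by
  induction d with
  | zero =>
    intro k l hl
    have hr : PySem.List.pyRange (k : Int) ((l.length : Int) - 1) 1 = [] := by
      apply PySem.List.pyRange_one_eq_nil; omega
    rw [hr]
    simp only [List.foldl_nil]
    have hdrop : l.drop (k + 1) = [] := List.drop_eq_nil_of_le (by omega)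
    have h1 : (l.drop k).length = 1 := by simp [hl]
    obtain ⟨a, ha⟩ := List.length_eq_one_iff.mp h1
    exact ⟨a, by rw [hdrop]; simpa [ha] using (List.take_append_drop k l).symm⟩
  | succ d ih =>
    intro k l hl
    have hk1 : k + 1 < l.length := by omega
    have hcons : PySem.List.pyRange (k : Int) ((l.length : Int) - 1) 1
        = (k : Int) :: PySem.List.pyRange ((k : Int) + 1) ((l.length : Int) - 1) 1 := by
      apply PySem.List.pyRange_one_cons; omega
    rw [hcons]
    simp only [List.foldl_cons]
    set v : Int := PySem.List.pyGetD l ((k : Int) + 1) 0 with hv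
    have hget : v = l.getD (k + 1) 0 := by
      rw [hv, show ((k : Int) + 1) = ((k + 1 : Nat) : Int) by push_cast; ring,
        PySem.List.pyGetD_natCast]
    have hset : PySem.List.pySetD l (k : Int) v = l.set k v := PySem.List.pySetD_natCast l k v
    rw [hset]
    set l' : List Int := l.set k v with hl'
    have hlen' : l'.length = l.length := by simp [hl']
    have hlen'' : l'.length = (k + 1) + 1 + d := by omega
    obtain ⟨x, hx⟩ := ih (k + 1) l' hlen''
    refine ⟨x, ?_⟩
    have hcast : ((k : Int) + 1) = ((k + 1 : Nat) : Int) := by push_cast; ring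
    rw [hcast, show ((l.length : Int) - 1) = ((l'.length : Int) - 1) by rw [hlen'], hx]
    -- l' = l.take k ++ v :: l.drop (k+1), and v = l[k+1]
    have hksplit : l' = l.take k ++ v :: l.drop (k + 1) := by
      rw [hl', List.set_eq_take_append_cons_drop, if_pos (show k < l.length by omega)]
    have hdropk1 : l.drop (k + 1) = l[k + 1] :: l.drop (k + 2) :=
      List.drop_eq_getElem_cons hk1
    have hvval : v = l[k + 1] := by
      rw [hget, List.getD_eq_getElem l 0 hk1]
    have htk : (l.take k).length = k := List.length_take_of_le (by omega)
    have htake : l'.take (k + 1) = l.take k ++ [v] := by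
      rw [hksplit, show k + 1 = (l.take k).length + 1 by rw [htk], List.take_append]
      simp
    have hdrop : l'.drop (k + 2) = l.drop (k + 2) := by
      rw [hksplit, show k + 2 = (l.take k).length + 2 by rw [htk], List.drop_append,
        List.drop_eq_nil_of_le (show (l.take k).length ≤ (l.take k).length + 2 by omega),
        List.nil_append, htk]
      rw [show k + 2 - k = 2 by omega, show (2 : Nat) = 1 + 1 from rfl, List.drop_succ_cons,
        List.drop_drop]
    rw [htake, hdrop, hdropk1, hvval]
    simp

theorem manual_delete_eq (arr : List Int) (index : Int)
    (h0 : 0 ≤ index) (h1 : index < (arr.length : Int)) :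
    manual_delete arr index = manual_delete_alt arr index := by
  unfold manual_delete manual_delete_alt
  simp only [if_neg (by omega : ¬ (index < 0 ∨ index ≥ (arr.length : Int)))]
  set k : Nat := index.toNat with hk
  have hik : index = (k : Int) := by omega
  have hklt : k < arr.length := by omega
  obtain ⟨x, hx⟩ := shift_foldl (arr.length - 1 - k) k arr (by omega)
  rw [hik, hx, PySem.List.slice_to_neg_one,
    show ((k : Int) + 1) = ((k + 1 : Nat) : Int) by push_cast; ring,
    PySem.List.slice_to_natCast, PySem.List.slice_from_natCast]
  simp

-- ===== VERDICT (by name: the statement is the Claim_ definition above) =====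
theorem manual_delete_spec : Claim_equal_manual_delete := by
  intro arr index _ hpre
  exact manual_delete_eq arr index hpre.1 hpre.2
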